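-- pv_equiv track=rewrite | github.com/seangerrykelly/leetcode-problems | twoOutOfThree.py | updateNumMap
-- ===== SOURCE A (Python) =====
-- def updateNumMap(nums, numMap):
--     distinctMap = {}
--
--     for num in nums:
--         if num not in distinctMap:
--             distinctMap[num] = 1
--             if num not in numMap:
--                 numMap[num] = 1
--             else:
--                 numMap[num] += 1
--
--     return numMap
-- ===== SOURCE B (Python) =====
-- def updateNumMap(nums, numMap):
--     present = set(nums)
--     for k in numMap:
--         if k in present:
--             numMap[k] += 1
--     for num in nums:
--         if num not in numMap:
--             numMap[num] = 1
--     return numMap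
-- ===== Notes on version B (the rewrite author's own statement) =====
-- stated objective: alternative
-- what changed: Instead of one pass over nums with a seen-dict and a membership branch, B stages the work: build the presence set of nums, make one pass over numMap's existing keys incrementing each key that is present, then one pass over nums appending the still-missing values with count 1.
import Mathlib
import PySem

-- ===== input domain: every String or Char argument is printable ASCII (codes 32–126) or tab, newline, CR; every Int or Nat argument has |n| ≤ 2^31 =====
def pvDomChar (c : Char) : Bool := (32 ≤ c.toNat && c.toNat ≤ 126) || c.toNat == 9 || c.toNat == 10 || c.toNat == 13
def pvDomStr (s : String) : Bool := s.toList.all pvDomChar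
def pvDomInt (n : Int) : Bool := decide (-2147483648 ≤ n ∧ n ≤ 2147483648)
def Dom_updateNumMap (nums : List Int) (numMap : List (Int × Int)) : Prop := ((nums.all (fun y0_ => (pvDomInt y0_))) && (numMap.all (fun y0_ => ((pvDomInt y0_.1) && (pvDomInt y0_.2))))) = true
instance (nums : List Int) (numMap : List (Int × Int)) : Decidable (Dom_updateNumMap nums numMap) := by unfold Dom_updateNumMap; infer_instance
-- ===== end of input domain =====

-- B stages the work differently from A: a presence set of nums, one pass over numMap's
-- EXISTING keys incrementing those present, then one pass over nums appending the missing
-- keys with count 1; objective: alternative (same cost, different decomposition).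
-- Both A and B mutate numMap in place and return it; the equivalence proved here is about the return value.

-- ===== PORT A =====
def updateNumMap (nums : List Int) (numMap : List (Int × Int)) : List (Int × Int) :=
  (nums.foldl
    (fun (st : PySem.Dict Int Int × PySem.Dict Int Int) num =>
      if st.1.contains num then st
      else (st.1.insert num 1,
            if st.2.contains num then st.2.insert num (st.2.getD num 0 + 1)
            else st.2.insert num 1))
    (PySem.Dict.empty, PySem.Dict.mk numMap)).2.items

-- ===== PORT B =====
def updateNumMap_alt (nums : List Int) (numMap : List (Int × Int)) : List (Int × Int) :=
  let present : PySem.Set Int := PySem.Set.ofList nums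
  let m1 := (PySem.Dict.mk numMap).keys.foldl
      (fun (m : PySem.Dict Int Int) k =>
        if present.contains k then m.insert k (m.getD k 0 + 1) else m)
      (PySem.Dict.mk numMap)
  (nums.foldl
    (fun (m : PySem.Dict Int Int) num =>
      if m.contains num then m else m.insert num 1) m1).items

-- ===== PRECONDITION & SPEC =====
-- Pre_ excludes association lists whose keys are not distinct: numMap is a Python dict,
-- which can never hold duplicate keys, so such lists represent no Python input at all.
def Pre_updateNumMap (nums : List Int) (numMap : List (Int × Int)) : Prop :=
  (numMap.map Prod.fst).Nodup
instance (nums : List Int) (numMap : List (Int × Int)) : Decidable (Pre_updateNumMap nums numMap) := by unfold Pre_updateNumMap; infer_instance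
def pvWitness_updateNumMap : List Int × (List (Int × Int)) := ([1, 2, 1, -3], [(2, 5), (7, 0)])

def Spec_updateNumMap (nums : List Int) (numMap : List (Int × Int)) (out : List (Int × Int)) : Prop := out = updateNumMap_alt nums numMap
instance (nums : List Int) (numMap : List (Int × Int)) (out : List (Int × Int)) : Decidable (Spec_updateNumMap nums numMap out) := by unfold Spec_updateNumMap; infer_instance

-- ===== CLAIM (what is proved, stated in full; the proofs are below) =====
def Claim_equal_updateNumMap : Prop := ∀ (nums : List Int) (numMap : List (Int × Int)), Dom_updateNumMap nums numMap → Pre_updateNumMap nums numMap → Spec_updateNumMap nums numMap (updateNumMap nums numMap)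

-- ===== LEMMAS AND PROOFS =====

/-- First-occurrence dedup of `l` relative to a set of already-seen elements. -/
def pvDedupFrom (seen : List Int) : List Int → List Int
  | [] => []
  | x :: xs => if x ∈ seen then pvDedupFrom seen xs else x :: pvDedupFrom (x :: seen) xs

theorem pvDedupFrom_congr (l : List Int) : ∀ (s t : List Int), (∀ a, a ∈ s ↔ a ∈ t) →
    pvDedupFrom s l = pvDedupFrom t l := by
  induction l with
  | nil => intro s t _; rfl
  | cons x xs ih =>
    intro s t h
    simp only [pvDedupFrom]
    by_cases hx : x ∈ s
    · rw [if_pos hx, if_pos ((h x).mp hx)]; exact ih s t h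
    · rw [if_neg hx, if_neg (fun hm => hx ((h x).mpr hm))]
      exact congrArg (x :: ·) (ih (x :: s) (x :: t) (by intro a; simp [h a]))

theorem pvFoldlAdd_eq (l : List Int) : ∀ (acc : List Int),
    l.foldl PySem.Set.add acc = acc ++ pvDedupFrom acc l := by
  induction l with
  | nil => intro acc; simp [pvDedupFrom]
  | cons x xs ih =>
    intro acc
    simp only [List.foldl_cons, pvDedupFrom, PySem.Set.add]
    by_cases hx : x ∈ acc
    · rw [if_pos (by simpa using hx), if_pos hx]; exact ih acc
    · rw [if_neg (by simpa using hx), if_neg hx, ih (acc ++ [x])]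
      rw [pvDedupFrom_congr xs (acc ++ [x]) (x :: acc) (by intro a; simp; tauto)]
      simp

theorem pvDedup_eq : ∀ (nums : List Int), PySem.List.dedup nums = pvDedupFrom [] nums := by
  intro nums
  rw [PySem.List.dedup_eq_ofList, PySem.Set.ofList_eq_foldl, pvFoldlAdd_eq]
  simp

/-- A's fold with seen-dict `d` computes the flat increment pass over
    the dedup of `nums` relative to `d.keys`. -/
theorem pvCore (nums : List Int) : ∀ (d m : PySem.Dict Int Int),
    (nums.foldl
      (fun (st : PySem.Dict Int Int × PySem.Dict Int Int) num =>
        if st.1.contains num then st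
        else (st.1.insert num 1,
              if st.2.contains num then st.2.insert num (st.2.getD num 0 + 1)
              else st.2.insert num 1))
      (d, m)).2
    = (pvDedupFrom d.keys nums).foldl
        (fun (m : PySem.Dict Int Int) num => m.insert num (m.getD num 0 + 1)) m := by
  induction nums with
  | nil => intro d m; rfl
  | cons x xs ih =>
    intro d m
    simp only [List.foldl_cons, pvDedupFrom]
    by_cases hx : d.contains x = true
    · rw [if_pos hx, if_pos ((PySem.Dict.contains_iff_mem_keys d x).mp hx)]
      exact ih d m
    · have hxf : d.contains x = false := by simpa using hx
      have hx' : x ∉ d.keys := fun hm => hx ((PySem.Dict.contains_iff_mem_keys d x).mpr hm)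
      rw [if_neg (by simpa using hx), if_neg hx']
      have hkeys : (d.insert x 1).keys = d.keys ++ [x] :=
        PySem.Dict.keys_insert_of_not_contains d 1 hxf
      have hstep : (if m.contains x then m.insert x (m.getD x 0 + 1) else m.insert x 1)
          = m.insert x (m.getD x 0 + 1) := by
        by_cases hm : m.contains x = true
        · rw [if_pos hm]
        · have hmf : m.contains x = false := by simpa using hm
          rw [if_neg (by simpa using hm)]
          simp [PySem.Dict.getD_of_not_contains, hmf]
      rw [ih, hstep, hkeys,
          pvDedupFrom_congr xs (d.keys ++ [x]) (x :: d.keys) (by intro a; simp; tauto)]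
      simp

/-- Dedup relative to `s ++ t` is dedup relative to `t` filtered by `s`. -/
theorem pvDedupFrom_append_filter (l : List Int) : ∀ (s t : List Int),
    pvDedupFrom (s ++ t) l = (pvDedupFrom t l).filter (fun x => !s.contains x) := by
  induction l with
  | nil => intro s t; rfl
  | cons x xs ih =>
    intro s t
    simp only [pvDedupFrom]
    by_cases ht : x ∈ t
    · rw [if_pos (by simp [ht]), if_pos ht]; exact ih s t
    · rw [if_neg ht]
      by_cases hs : x ∈ s
      · rw [if_pos (by simp [hs]), List.filter_cons, if_neg (by simpa using hs)]
        rw [← ih s (x :: t),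
            pvDedupFrom_congr xs (s ++ x :: t) (s ++ t) (by
              intro a; simp only [List.mem_append, List.mem_cons]
              constructor
              · rintro (h | rfl | h)
                exacts [Or.inl h, Or.inl hs, Or.inr h]
              · rintro (h | h)
                exacts [Or.inl h, Or.inr (Or.inr h)])]
      · rw [if_neg (by simp [hs, ht]), List.filter_cons, if_pos (by simpa using hs)]
        rw [← ih s (x :: t),
            pvDedupFrom_congr xs (s ++ x :: t) (x :: (s ++ t)) (by intro a; simp; tauto)]

/-- Increment map used to describe A's flat pass. -/
def pvF (l : List Int) (p : Int × Int) : Int × Int := if p.1 ∈ l then (p.1, p.2 + 1) else p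

/-- A's flat increment pass, as map-existing ++ append-fresh. -/
theorem pvA_items (l : List Int) : ∀ (m : PySem.Dict Int Int), l.Nodup → m.keys.Nodup →
    (l.foldl (fun (m : PySem.Dict Int Int) x => m.insert x (m.getD x 0 + 1)) m).items
    = m.items.map (pvF l)
      ++ (l.filter (fun x => !m.contains x)).map (fun x => (x, (1 : Int))) := by
  induction l with
  | nil =>
    intro m _ _
    simp only [List.foldl_nil, List.filter_nil, List.map_nil, List.append_nil]
    rw [show pvF [] = id from funext fun p => by simp [pvF], List.map_id]
  | cons x xs ih =>
    intro m hnd hkm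
    obtain ⟨hxxs, hxs⟩ := List.nodup_cons.mp hnd
    simp only [List.foldl_cons, List.filter_cons]
    by_cases hc : m.contains x = true
    · rw [if_neg (by simp [hc])]
      have hitems := PySem.Dict.items_insert_of_contains (d := m) (v := m.getD x 0 + 1) hc
      have hkeys := PySem.Dict.keys_insert_of_contains (d := m) (v := m.getD x 0 + 1) hc
      have hfil : xs.filter (fun y => !(m.insert x (m.getD x 0 + 1)).contains y)
          = xs.filter (fun y => !m.contains y) := by
        apply List.filter_congr
        intro y hy
        have hyx : (y == x) = false := by
          simp only [beq_eq_false_iff_ne]; rintro rfl; exact hxxs hy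
        simp [PySem.Dict.contains_insert, hyx]
      rw [ih (m.insert x (m.getD x 0 + 1)) hxs (hkeys ▸ hkm), hitems, List.map_map, hfil]
      congr 1
      apply List.map_congr_left
      intro p hp
      by_cases hpx : p.1 = x
      · have hv : m.getD x 0 = p.2 := by
          have hm : (x, p.2) ∈ m.items := by
            have : p = (x, p.2) := by cases p; simp_all
            rw [← this]; exact hp
          exact PySem.Dict.getD_of_mem_items m hm hkm 0
        simp [Function.comp, pvF, hpx, hv, hxxs]
      · simp [Function.comp, pvF, hpx]
    · have hcf : m.contains x = false := by simpa using hc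
      rw [if_pos (by simp [hcf])]
      have hxk : x ∉ m.keys := fun hm => hc ((PySem.Dict.contains_iff_mem_keys m x).mpr hm)
      have hitems : (m.insert x (m.getD x 0 + 1)).items = m.items ++ [(x, 1)] := by
        rw [PySem.Dict.getD_of_not_contains m 0 hcf,
            PySem.Dict.items_insert_of_not_contains (d := m) (v := (0 : Int) + 1) hcf]
        norm_num
      have hkeys : (m.insert x (m.getD x 0 + 1)).keys = m.keys ++ [x] := by
        rw [PySem.Dict.keys_insert_of_not_contains m _ hcf]
      have hknd : (m.insert x (m.getD x 0 + 1)).keys.Nodup := by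
        rw [hkeys]
        refine List.Nodup.append hkm (List.nodup_singleton x) ?_
        intro a ha hb
        rw [List.mem_singleton] at hb
        exact hxk (hb ▸ ha)
      rw [ih (m.insert x (m.getD x 0 + 1)) hxs hknd, hitems]
      have hmap : (m.items ++ [(x, (1 : Int))]).map (pvF xs)
          = m.items.map (pvF (x :: xs)) ++ [(x, 1)] := by
        rw [List.map_append]
        congr 1
        · apply List.map_congr_left
          intro p hp
          have hpx : p.1 ≠ x := fun h => hxk (h ▸ PySem.Dict.mem_keys_of_mem_items _ hp)
          simp [pvF, hpx]
        · simp [pvF, hxxs]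
      have hfil : xs.filter (fun y => !(m.insert x (m.getD x 0 + 1)).contains y)
          = xs.filter (fun y => !m.contains y) := by
        apply List.filter_congr
        intro y hy
        have hyx : (y == x) = false := by
          simp only [beq_eq_false_iff_ne]; rintro rfl; exact hxxs hy
        simp [PySem.Dict.contains_insert, hyx]
      rw [hmap, hfil]
      simp

/-- Increment map used to describe B's first stage. -/
def pvG (ks : List Int) (pres : Int → Bool) (p : Int × Int) : Int × Int :=
  if p.1 ∈ ks then (if pres p.1 then (p.1, p.2 + 1) else p) else p

/-- B's first stage: a pass over contained keys maps the items in place. -/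
theorem pvB1 (pres : Int → Bool) (ks : List Int) : ∀ (m : PySem.Dict Int Int),
    ks.Nodup → m.keys.Nodup → (∀ k ∈ ks, m.contains k = true) →
    (ks.foldl (fun (m : PySem.Dict Int Int) k =>
        if pres k then m.insert k (m.getD k 0 + 1) else m) m).items
    = m.items.map (pvG ks pres) := by
  induction ks with
  | nil =>
    intro m _ _ _
    simp only [List.foldl_nil]
    rw [show pvG [] pres = id from funext fun p => by simp [pvG], List.map_id]
  | cons k ks ih =>
    intro m hnd hkm hall
    obtain ⟨hkks, hks⟩ := List.nodup_cons.mp hnd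
    have hc : m.contains k = true := hall k (by simp)
    simp only [List.foldl_cons]
    by_cases hp : pres k = true
    · rw [if_pos hp]
      have hitems := PySem.Dict.items_insert_of_contains (d := m) (v := m.getD k 0 + 1) hc
      have hkeys := PySem.Dict.keys_insert_of_contains (d := m) (v := m.getD k 0 + 1) hc
      have hall' : ∀ j ∈ ks, (m.insert k (m.getD k 0 + 1)).contains j = true := by
        intro j hj
        rw [PySem.Dict.contains_insert]
        simp [hall j (by simp [hj])]
      rw [ih (m.insert k (m.getD k 0 + 1)) hks (hkeys ▸ hkm) hall', hitems, List.map_map]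
      apply List.map_congr_left
      intro p hpmem
      by_cases hpk : p.1 = k
      · have hv : m.getD k 0 = p.2 := by
          have hm : (k, p.2) ∈ m.items := by
            have : p = (k, p.2) := by cases p; simp_all
            rw [← this]; exact hpmem
          exact PySem.Dict.getD_of_mem_items m hm hkm 0
        simp [Function.comp, pvG, hpk, hv, hkks, hp]
      · simp [Function.comp, pvG, hpk]
    · rw [if_neg hp]
      rw [ih m hks hkm (fun j hj => hall j (by simp [hj]))]
      apply List.map_congr_left
      intro p hpmem
      by_cases hpk : p.1 = k
      · simp [pvG, hpk, hkks, hp]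
      · simp [pvG, hpk]

/-- B's second stage: appends the fresh first occurrences with value 1. -/
theorem pvB2 (l : List Int) : ∀ (m : PySem.Dict Int Int),
    (l.foldl (fun (m : PySem.Dict Int Int) x =>
        if m.contains x then m else m.insert x 1) m).items
    = m.items ++ (pvDedupFrom m.keys l).map (fun x => (x, (1 : Int))) := by
  induction l with
  | nil => intro m; simp [pvDedupFrom]
  | cons x xs ih =>
    intro m
    simp only [List.foldl_cons, pvDedupFrom]
    by_cases hc : m.contains x = true
    · rw [if_pos hc, if_pos ((PySem.Dict.contains_iff_mem_keys m x).mp hc)]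
      exact ih m
    · have hcf : m.contains x = false := by simpa using hc
      have hxk : x ∉ m.keys := fun hm => hc ((PySem.Dict.contains_iff_mem_keys m x).mpr hm)
      rw [if_neg (by simpa using hc), if_neg hxk]
      have hitems : (m.insert x 1).items = m.items ++ [(x, 1)] :=
        PySem.Dict.items_insert_of_not_contains (d := m) (v := (1 : Int)) hcf
      have hkeys : (m.insert x 1).keys = m.keys ++ [x] :=
        PySem.Dict.keys_insert_of_not_contains m 1 hcf
      rw [ih (m.insert x 1), hitems, hkeys,
          pvDedupFrom_congr xs (m.keys ++ [x]) (x :: m.keys) (by intro a; simp; tauto)]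
      simp

-- ===== VERDICT (by name: the statement is the Claim_ definition above) =====
theorem updateNumMap_spec : Claim_equal_updateNumMap := by
  intro nums numMap _ hpre
  unfold Spec_updateNumMap updateNumMap updateNumMap_alt
  dsimp only
  have hkeys0 : (PySem.Dict.mk numMap).keys = numMap.map Prod.fst := by
    simp [PySem.Dict.keys]
  have hnd0 : (PySem.Dict.mk numMap).keys.Nodup := by rw [hkeys0]; exact hpre
  -- the deduped nums and its properties
  have hLnd : (pvDedupFrom [] nums).Nodup := by
    rw [← pvDedup_eq, PySem.List.dedup_eq_ofList]
    exact PySem.Set.nodup_ofList nums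
  have hLmem : ∀ a, a ∈ pvDedupFrom [] nums ↔ a ∈ nums := by
    intro a
    rw [← pvDedup_eq, PySem.List.dedup_eq_ofList]
    exact PySem.Set.mem_ofList nums a
  -- A's side
  rw [pvCore]
  have hdk : (PySem.Dict.empty : PySem.Dict Int Int).keys = ([] : List Int) := by
    simp [PySem.Dict.keys_empty]
  rw [hdk, pvA_items (pvDedupFrom [] nums) (PySem.Dict.mk numMap) hLnd hnd0]
  -- B's side
  rw [pvB2]
  rw [pvB1 (fun k => (PySem.Set.ofList nums).contains k) (PySem.Dict.mk numMap).keys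
        (PySem.Dict.mk numMap) hnd0 hnd0
        (fun k hk => (PySem.Dict.contains_iff_mem_keys _ k).mpr hk)]
  have hkeys1 : ((PySem.Dict.mk numMap).keys.foldl (fun (m : PySem.Dict Int Int) k =>
      if (PySem.Set.ofList nums).contains k then m.insert k (m.getD k 0 + 1) else m)
      (PySem.Dict.mk numMap)).keys = (PySem.Dict.mk numMap).keys := by
    rw [PySem.Dict.keys,
        pvB1 (fun k => (PySem.Set.ofList nums).contains k) (PySem.Dict.mk numMap).keys
          (PySem.Dict.mk numMap) hnd0 hnd0
          (fun k hk => (PySem.Dict.contains_iff_mem_keys _ k).mpr hk),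
        List.map_map]
    have : ∀ p ∈ (PySem.Dict.mk numMap).items,
        (Prod.fst ∘ pvG (PySem.Dict.mk numMap).keys (fun k => (PySem.Set.ofList nums).contains k)) p
        = p.1 := by
      intro p _
      simp only [Function.comp, pvG]
      split_ifs <;> rfl
    rw [List.map_congr_left this]
    rfl
  rw [hkeys1]
  congr 1
  · -- mapped existing items agree
    apply List.map_congr_left
    intro p hp
    have hpk : p.1 ∈ (PySem.Dict.mk numMap).keys := PySem.Dict.mem_keys_of_mem_items _ hp
    have hL : (p.1 ∈ pvDedupFrom [] nums) ↔ ((PySem.Set.ofList nums).contains p.1 = true) := by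
      rw [hLmem]
      constructor
      · intro h
        have : p.1 ∈ PySem.Set.ofList nums := (PySem.Set.mem_ofList nums p.1).mpr h
        simpa using this
      · intro h
        exact (PySem.Set.mem_ofList nums p.1).mp (by simpa using h)
    simp only [pvF, pvG, if_pos hpk]
    by_cases hmem : p.1 ∈ pvDedupFrom [] nums
    · rw [if_pos hmem, if_pos (hL.mp hmem)]
    · rw [if_neg hmem, if_neg (fun h => hmem (hL.mpr h))]
  · -- appended fresh items agree
    congr 1
    rw [show (PySem.Dict.mk numMap).keys = (PySem.Dict.mk numMap).keys ++ [] by simp,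
        pvDedupFrom_append_filter nums (PySem.Dict.mk numMap).keys []]
    apply List.filter_congr
    intro y _
    rw [PySem.Dict.contains_eq_decide_mem_keys]
    simp
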